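-- pv_equiv track=rewrite | github.com/AlejandroMus/dfn-ranking-unranking | paper_algorithm.py | alpha_intervals_from_levels
-- ===== SOURCE A (Python) =====
-- from typing import List, Tuple, Optional
--
-- def alpha_intervals_from_levels(
--     levels: List[int], n: int, m: int
-- ) -> List[Tuple[int, int]]:
--     """
--     For j = m..2, return [a_j,b_j] where A_{y_j} = {x : level(x) >= j-1} = [a_j,b_j].
--     """
--     res: List[Tuple[int, int]] = []
--     for j in range(m, 1, -1):
--         thr = j - 1
--         indices = [x for x, lv in enumerate(levels) if lv >= thr]
--         if not indices:
--             raise ValueError(f"Empty α-cut at level j={j}; not a valid CUTS DFN.")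
--         res.append((indices[0], indices[-1]))
--     return res  # length m-1, entries for j = m,...,2
-- ===== SOURCE B (Python) =====
-- from typing import List, Tuple
--
-- def alpha_intervals_from_levels(
--     levels: List[int], n: int, m: int
-- ) -> List[Tuple[int, int]]:
--     # One pass: bucket first/last index by level (clamped to m-1), then one
--     # suffix sweep over thresholds m-1..1 keeps a running min/max index.
--     first = {}
--     last = {}
--     for i, lv in enumerate(levels):
--         t = min(lv, m - 1)
--         if t >= 1:
--             if t not in first:
--                 first[t] = i
--             last[t] = i
--     res: List[Tuple[int, int]] = []
--     fmin = None
--     lmax = None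
--     for thr in range(m - 1, 0, -1):
--         if thr in first:
--             f = first[thr]
--             g = last[thr]
--             fmin = f if fmin is None else min(fmin, f)
--             lmax = g if lmax is None else max(lmax, g)
--         if fmin is None:
--             raise ValueError(f"Empty α-cut at level j={thr + 1}; not a valid CUTS DFN.")
--         res.append((fmin, lmax))
--     return res
-- ===== Notes on version B (the rewrite author's own statement) =====
-- stated objective: faster
-- what changed: Replaces A's per-threshold rescan of levels (one full comprehension per j) with a single bucketing pass that records the first/last index per clamped level value in two dicts, plus one suffix sweep over thresholds keeping a running min/max index.
import Mathlib
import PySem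

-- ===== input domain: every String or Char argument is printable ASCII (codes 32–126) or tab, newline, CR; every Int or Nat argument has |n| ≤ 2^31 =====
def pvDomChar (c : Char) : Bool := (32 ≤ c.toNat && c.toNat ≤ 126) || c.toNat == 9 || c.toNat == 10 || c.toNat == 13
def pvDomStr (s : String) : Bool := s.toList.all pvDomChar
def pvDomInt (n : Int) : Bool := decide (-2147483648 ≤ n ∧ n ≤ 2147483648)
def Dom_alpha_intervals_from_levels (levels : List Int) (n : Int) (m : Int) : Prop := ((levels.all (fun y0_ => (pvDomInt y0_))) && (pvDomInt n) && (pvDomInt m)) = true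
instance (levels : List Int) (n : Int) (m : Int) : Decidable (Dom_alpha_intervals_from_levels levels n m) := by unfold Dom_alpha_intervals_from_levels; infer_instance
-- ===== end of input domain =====

-- B replaces A's per-threshold scan (O(n·m)) by one bucketing pass over the levels plus one
-- suffix sweep over the thresholds (O(n+m)); measured faster. Equivalence is claimed on inputs
-- where A returns (Pre_ excludes exactly the inputs where A raises ValueError; B raises there too).

-- ===== PORT A =====
-- A's per-threshold comprehension: `[x for x, lv in enumerate(levels) if lv >= thr]`
def pvACut (levels : List Int) (thr : Int) : List Int :=
  ((PySem.List.enumerate levels).filter (fun p => decide (thr ≤ p.2))).map (fun p => p.1)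

-- one iteration of A's loop over j (thr = j-1); the `| _, _` branch is Python's
-- `raise ValueError` on an empty α-cut — such inputs are excluded by Pre_
def pvAStep (levels : List Int) (res : List (Int × Int)) (j : Int) : List (Int × Int) :=
  match (pvACut levels (j - 1)).head?, (pvACut levels (j - 1)).getLast? with
  | some a, some b => res ++ [(a, b)]
  | _, _ => res

def alpha_intervals_from_levels (levels : List Int) (n : Int) (m : Int) : List (Int × Int) :=
  (PySem.List.pyRange m 1 (-1)).foldl (pvAStep levels) []

-- ===== PORT B =====
-- bucketing pass: first/last index per level value clamped to m-1 (Source B's two dicts)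
def pvBBuild (m : Int) (fl : PySem.Dict Int Int × PySem.Dict Int Int) (p : Int × Int) :
    PySem.Dict Int Int × PySem.Dict Int Int :=
  let t := min p.2 (m - 1)
  if 1 ≤ t then
    ((if fl.1.contains t then fl.1 else fl.1.insert t p.1), fl.2.insert t p.1)
  else fl

-- the `if thr in first:` update of Source B's running (fmin, lmax)
def pvBComb (fl : PySem.Dict Int Int × PySem.Dict Int Int)
    (st : Option Int × Option Int × List (Int × Int)) (thr : Int) : Option Int × Option Int :=
  match fl.1.get? thr, fl.2.get? thr with
  | some f, some g =>
      (some (match st.1 with | none => f | some x => min x f),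
       some (match st.2.1 with | none => g | some y => max y g))
  | _, _ => (st.1, st.2.1)

-- one iteration of Source B's suffix sweep; state = (fmin, lmax, res); the fall-through
-- branch is Source B's `raise ValueError` — such inputs are excluded by Pre_
def pvBSweep (fl : PySem.Dict Int Int × PySem.Dict Int Int)
    (st : Option Int × Option Int × List (Int × Int)) (thr : Int) :
    Option Int × Option Int × List (Int × Int) :=
  match pvBComb fl st thr with
  | (some a, some b) => (some a, some b, st.2.2 ++ [(a, b)])
  | (f, l) => (f, l, st.2.2)

def alpha_intervals_from_levels_alt (levels : List Int) (n : Int) (m : Int) : List (Int × Int) :=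
  let fl := (PySem.List.enumerate levels).foldl (pvBBuild m)
      (PySem.Dict.empty, PySem.Dict.empty)
  ((PySem.List.pyRange (m - 1) 0 (-1)).foldl (pvBSweep fl) (none, none, [])).2.2

-- ===== PRECONDITION & SPEC =====
-- Pre_ excludes exactly the inputs where A raises ValueError (an empty α-cut: m ≥ 2 with
-- no level ≥ m-1); B raises the same error there.
def Pre_alpha_intervals_from_levels (levels : List Int) (n : Int) (m : Int) : Prop :=
  m ≤ 1 ∨ ∃ lv ∈ levels, m - 1 ≤ lv
instance (levels : List Int) (n : Int) (m : Int) : Decidable (Pre_alpha_intervals_from_levels levels n m) := by unfold Pre_alpha_intervals_from_levels; infer_instance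

def pvWitness_alpha_intervals_from_levels : List Int × Int × Int := ([0, 2, 1], 3, 3)

def Spec_alpha_intervals_from_levels (levels : List Int) (n : Int) (m : Int) (out : List (Int × Int)) : Prop := out = alpha_intervals_from_levels_alt levels n m
instance (levels : List Int) (n : Int) (m : Int) (out : List (Int × Int)) : Decidable (Spec_alpha_intervals_from_levels levels n m out) := by unfold Spec_alpha_intervals_from_levels; infer_instance

-- ===== CLAIM (what is proved, stated in full; the proofs are below) =====
def Claim_equal_alpha_intervals_from_levels : Prop := ∀ (levels : List Int) (n : Int) (m : Int), Dom_alpha_intervals_from_levels levels n m → Pre_alpha_intervals_from_levels levels n m → Spec_alpha_intervals_from_levels levels n m (alpha_intervals_from_levels levels n m)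

-- ===== LEMMAS AND PROOFS =====

-- the clamped level ("bucket key") of an enumerated element
def pvKey (m : Int) (p : Int × Int) : Int := min p.2 (m - 1)

-- elements whose key is ≥ t / exactly t
def pvGe (levels : List Int) (m t : Int) : List (Int × Int) :=
  (PySem.List.enumerate levels).filter (fun p => decide (t ≤ pvKey m p))
def pvEqf (levels : List Int) (m t : Int) : List (Int × Int) :=
  (PySem.List.enumerate levels).filter (fun p => decide (pvKey m p = t))

def pvOptMin (a b : Option Int) : Option Int :=
  match a, b with
  | none, y => y
  | some x, none => some x
  | some x, some y => some (min x y)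
def pvOptMax (a b : Option Int) : Option Int :=
  match a, b with
  | none, y => y
  | some x, none => some x
  | some x, some y => some (max x y)

theorem pv_head_filter_or (E : List (Int × Int)) (hp : E.Pairwise (fun a b => a.1 < b.1))
    (q1 q2 : Int × Int → Bool) :
    ((E.filter (fun p => q1 p || q2 p)).head?.map Prod.fst)
      = pvOptMin ((E.filter q1).head?.map Prod.fst) ((E.filter q2).head?.map Prod.fst) := by
  induction E with
  | nil => simp [pvOptMin]
  | cons p rest ih =>
    have hlt : ∀ r ∈ rest, p.1 < r.1 := (List.pairwise_cons.mp hp).1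
    have hrest := (List.pairwise_cons.mp hp).2
    have hmem1 : ∀ (q : Int × Int → Bool) (y : Int),
        ((List.find? q rest).map Prod.fst) = some y → p.1 < y := by
      intro q y hy
      rcases Option.map_eq_some_iff.mp hy with ⟨r, hr, hry⟩
      have : r ∈ rest := List.mem_of_find?_eq_some hr
      exact hry ▸ hlt r this
    by_cases h1 : q1 p = true <;> by_cases h2 : q2 p = true
    · simp [List.filter_cons, h1, h2, pvOptMin]
    · simp only [List.filter_cons, h1, h2]
      simp only [Bool.true_or, if_pos, List.head?_cons, Option.map_some, if_neg, Bool.false_ne_true,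
        not_false_iff, reduceIte]
      rcases hq2 : ((List.find? q2 rest).map Prod.fst) with _ | y
      · simp [pvOptMin, hq2]
      · have := hmem1 q2 y hq2
        simp [pvOptMin, hq2, min_eq_left (le_of_lt this)]
    · simp only [List.filter_cons, h1, h2]
      simp only [Bool.or_true, if_pos, List.head?_cons, Option.map_some, if_neg, Bool.false_ne_true,
        not_false_iff, reduceIte]
      rcases hq1 : ((List.find? q1 rest).map Prod.fst) with _ | y
      · simp [pvOptMin, hq1]
      · have := hmem1 q1 y hq1
        simp [pvOptMin, hq1, min_eq_right (le_of_lt this)]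
    · simp only [List.filter_cons, h1, h2]
      simp only [Bool.or_self, Bool.false_ne_true, not_false_iff, if_neg, reduceIte]
      exact ih hrest

theorem pv_last_filter_or (E : List (Int × Int)) (hp : E.Pairwise (fun a b => a.1 < b.1))
    (q1 q2 : Int × Int → Bool) :
    ((E.filter (fun p => q1 p || q2 p)).getLast?.map Prod.fst)
      = pvOptMax ((E.filter q1).getLast?.map Prod.fst) ((E.filter q2).getLast?.map Prod.fst) := by
  induction E using List.reverseRecOn with
  | nil => simp [pvOptMax]
  | append_singleton rest p ih =>
    have hlt : ∀ r ∈ rest, r.1 < p.1 := by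
      have h := List.pairwise_append.mp hp
      intro r hr; exact h.2.2 r hr p (by simp)
    have hrest : rest.Pairwise (fun a b => a.1 < b.1) := (List.pairwise_append.mp hp).1
    have hmem1 : ∀ (q : Int × Int → Bool) (y : Int),
        ((rest.filter q).getLast?.map Prod.fst) = some y → y < p.1 := by
      intro q y hy
      rcases Option.map_eq_some_iff.mp hy with ⟨r, hr, hry⟩
      exact hry ▸ hlt r (List.mem_of_mem_filter (List.mem_of_mem_getLast? hr))
    rw [List.filter_append, List.filter_append, List.filter_append]
    by_cases h1 : q1 p = true <;> by_cases h2 : q2 p = true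
    · have e0 : List.filter (fun p => q1 p || q2 p) [p] = [p] := by simp [h1, h2]
      have e1 : List.filter q1 [p] = [p] := by simp [h1]
      have e2 : List.filter q2 [p] = [p] := by simp [h2]
      rw [e0, e1, e2]
      simp [List.getLast?_append, pvOptMax]
    · have e0 : List.filter (fun p => q1 p || q2 p) [p] = [p] := by simp [h1]
      have e1 : List.filter q1 [p] = [p] := by simp [h1]
      have e2 : List.filter q2 [p] = [] := by simp [h2]
      rw [e0, e1, e2, List.append_nil]
      rcases hq2 : ((rest.filter q2).getLast?.map Prod.fst) with _ | y
      · simp [List.getLast?_append, pvOptMax, hq2]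
      · have := hmem1 q2 y hq2
        simp [List.getLast?_append, pvOptMax, hq2, max_eq_left (le_of_lt this)]
    · have e0 : List.filter (fun p => q1 p || q2 p) [p] = [p] := by simp [h2]
      have e1 : List.filter q1 [p] = [] := by simp [h1]
      have e2 : List.filter q2 [p] = [p] := by simp [h2]
      rw [e0, e1, e2, List.append_nil]
      rcases hq1 : ((rest.filter q1).getLast?.map Prod.fst) with _ | y
      · simp [List.getLast?_append, pvOptMax, hq1]
      · have := hmem1 q1 y hq1
        simp [List.getLast?_append, pvOptMax, hq1, max_eq_right (le_of_lt this)]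
    · have e0 : List.filter (fun p => q1 p || q2 p) [p] = [] := by simp [h1, h2]
      have e1 : List.filter q1 [p] = [] := by simp [h1]
      have e2 : List.filter q2 [p] = [] := by simp [h2]
      rw [e0, e1, e2, List.append_nil, List.append_nil, List.append_nil]
      exact ih hrest

theorem pv_build_spec (m : Int) (E : List (Int × Int)) (t : Int) (ht : 1 ≤ t) :
    ((E.foldl (pvBBuild m) (PySem.Dict.empty, PySem.Dict.empty)).1.get? t
        = (E.filter (fun p => decide (pvKey m p = t))).head?.map Prod.fst)
    ∧ ((E.foldl (pvBBuild m) (PySem.Dict.empty, PySem.Dict.empty)).2.get? t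
        = (E.filter (fun p => decide (pvKey m p = t))).getLast?.map Prod.fst) := by
  induction E using List.reverseRecOn with
  | nil => constructor <;> simp [PySem.Dict.get?_empty]
  | append_singleton E' p ih =>
    simp only [List.foldl_append, List.foldl_cons, List.foldl_nil, List.filter_append]
    set D := E'.foldl (pvBBuild m) (PySem.Dict.empty, PySem.Dict.empty) with hD
    by_cases h1 : 1 ≤ min p.2 (m - 1)
    · have hstep : (pvBBuild m D p)
          = (if D.1.contains (min p.2 (m - 1)) then D.1 else D.1.insert (min p.2 (m - 1)) p.1,
             D.2.insert (min p.2 (m - 1)) p.1) := by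
        simp [pvBBuild, h1]
      rw [hstep]
      by_cases het : min p.2 (m - 1) = t
      · have hfp : List.filter (fun q => decide (pvKey m q = t)) [p] = [p] := by
          simp [pvKey, het]
        rw [hfp]
        constructor
        · rcases hh : (E'.filter (fun q => decide (pvKey m q = t))).head? with _ | r
          · have hget : D.1.get? t = none := by rw [ih.1, hh]; rfl
            have hc : D.1.contains (min p.2 (m - 1)) = false := by
              rw [het, PySem.Dict.contains_eq_isSome_get?, hget]; rfl
            rw [if_neg (by simp [hc]), PySem.Dict.get?_insert, if_pos het.symm,
              List.head?_append, hh]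
            rfl
          · have hget : D.1.get? t = some r.1 := by rw [ih.1, hh]; rfl
            have hc : D.1.contains (min p.2 (m - 1)) = true := by
              rw [het, PySem.Dict.contains_eq_isSome_get?, hget]; rfl
            rw [if_pos hc, hget, List.head?_append, hh]
            rfl
        · rw [PySem.Dict.get?_insert, if_pos het.symm, List.getLast?_append]
          rfl
      · have hfp : List.filter (fun q => decide (pvKey m q = t)) [p] = [] := by
          simp [pvKey, het]
        rw [hfp, List.append_nil]
        have hne : t ≠ min p.2 (m - 1) := fun h => het h.symm
        constructor
        · by_cases hc : D.1.contains (min p.2 (m - 1)) = true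
          · rw [if_pos hc]; exact ih.1
          · rw [if_neg (by simp [Bool.not_eq_true] at hc; simp [hc]),
              PySem.Dict.get?_insert, if_neg hne]
            exact ih.1
        · rw [PySem.Dict.get?_insert, if_neg hne]
          exact ih.2
    · have hstep : (pvBBuild m D p) = D := by simp [pvBBuild, h1]
      have hkey : pvKey m p ≠ t := by
        unfold pvKey
        omega
      have hfp : List.filter (fun q => decide (pvKey m q = t)) [p] = [] := by
        simp [hkey]
      rw [hstep, hfp, List.append_nil]
      exact ih

theorem pv_ge_ne_nil (levels : List Int) (m t : Int) (ht : t ≤ m - 1)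
    (hne : ∃ lv ∈ levels, m - 1 ≤ lv) : pvGe levels m t ≠ [] := by
  obtain ⟨lv, hmem, hle⟩ := hne
  obtain ⟨k, hk, hkv⟩ := List.mem_iff_getElem.mp hmem
  have hE : ((k : Int), lv) ∈ PySem.List.enumerate levels := by
    rw [PySem.List.mem_enumerate_iff]
    exact ⟨k, hk, by simp [hkv]⟩
  have : ((k : Int), lv) ∈ pvGe levels m t := by
    refine List.mem_filter.mpr ⟨hE, ?_⟩
    simp only [pvKey, decide_eq_true_eq]
    omega
  exact List.ne_nil_of_mem this

theorem pv_sweep_eq (levels : List Int) (m : Int) (hne : ∃ lv ∈ levels, m - 1 ≤ lv)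
    (t : Int) (ht : t ≤ m - 1) (res : List (Int × Int)) :
    (PySem.List.pyRange (t + 1) 1 (-1)).foldl (pvAStep levels) res
      = ((PySem.List.pyRange t 0 (-1)).foldl
          (pvBSweep ((PySem.List.enumerate levels).foldl (pvBBuild m) (PySem.Dict.empty, PySem.Dict.empty)))
          ((pvGe levels m (t + 1)).head?.map Prod.fst,
           (pvGe levels m (t + 1)).getLast?.map Prod.fst, res)).2.2 := by
  have aux : ∀ (k : Nat) (t : Int), t.toNat = k → t ≤ m - 1 → ∀ (res : List (Int × Int)),
      (PySem.List.pyRange (t + 1) 1 (-1)).foldl (pvAStep levels) res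
        = ((PySem.List.pyRange t 0 (-1)).foldl
            (pvBSweep ((PySem.List.enumerate levels).foldl (pvBBuild m) (PySem.Dict.empty, PySem.Dict.empty)))
            ((pvGe levels m (t + 1)).head?.map Prod.fst,
             (pvGe levels m (t + 1)).getLast?.map Prod.fst, res)).2.2 := by
    intro k
    induction k with
    | zero =>
      intro t htk ht res
      rw [PySem.List.pyRange_neg_one_eq_nil (by omega : t + 1 ≤ 1),
        PySem.List.pyRange_neg_one_eq_nil (by omega : t ≤ 0)]
      simp
    | succ k ihk =>
      intro t htk ht res
      have ht1 : 1 ≤ t := by omega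
      rw [PySem.List.pyRange_neg_one_cons (by omega : (1:Int) < t + 1),
        PySem.List.pyRange_neg_one_cons (by omega : (0:Int) < t)]
      simp only [List.foldl_cons]
      -- the two filters occurring in this step
      have hsplit : pvGe levels m t
          = (PySem.List.enumerate levels).filter
              (fun p => decide (t + 1 ≤ pvKey m p) || decide (pvKey m p = t)) := by
        unfold pvGe
        refine List.filter_congr ?_
        intro p _
        by_cases h1 : t + 1 ≤ pvKey m p
        · have h3 : t ≤ pvKey m p := by omega
          simp [h1, h3]
        · by_cases h2 : pvKey m p = t
          · simp [h1, h2]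
          · have h3 : ¬(t ≤ pvKey m p) := by omega
            simp [h1, h2, h3]
      have hW := PySem.List.pairwise_lt_enumerate (xs := levels) (s := 0)
      have hHd : (pvGe levels m t).head?.map Prod.fst
          = pvOptMin ((pvGe levels m (t + 1)).head?.map Prod.fst)
              ((pvEqf levels m t).head?.map Prod.fst) := by
        rw [hsplit]
        exact pv_head_filter_or _ hW _ _
      have hLd : (pvGe levels m t).getLast?.map Prod.fst
          = pvOptMax ((pvGe levels m (t + 1)).getLast?.map Prod.fst)
              ((pvEqf levels m t).getLast?.map Prod.fst) := by
        rw [hsplit]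
        exact pv_last_filter_or _ hW _ _
      -- A's step appends the head/last of pvGe t
      have hne' : pvGe levels m t ≠ [] := pv_ge_ne_nil levels m t ht hne
      rcases ha : (pvGe levels m t).head? with _ | a
      · exact absurd (List.head?_eq_none_iff.mp ha) hne'
      rcases hb : (pvGe levels m t).getLast? with _ | b
      · exact absurd (List.getLast?_eq_none_iff.mp hb) hne'
      have hAstep : pvAStep levels res (t + 1) = res ++ [(a.1, b.1)] := by
        unfold pvAStep
        have hfeq : pvACut levels (t + 1 - 1) = (pvGe levels m t).map (fun p => p.1) := by
          unfold pvACut pvGe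
          congr 1
          refine List.filter_congr ?_
          intro p _
          refine decide_eq_decide.mpr ?_
          unfold pvKey; omega
        rw [hfeq, List.head?_map, List.getLast?_map, ha, hb]
        rfl
      -- B's step produces the same pair and carries the pvGe t extremes
      have hB1 := (pv_build_spec m (PySem.List.enumerate levels) t ht1).1
      have hB2 := (pv_build_spec m (PySem.List.enumerate levels) t ht1).2
      have hBstep : pvBSweep ((PySem.List.enumerate levels).foldl (pvBBuild m) (PySem.Dict.empty, PySem.Dict.empty))
            ((pvGe levels m (t + 1)).head?.map Prod.fst,
             (pvGe levels m (t + 1)).getLast?.map Prod.fst, res) t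
          = ((pvGe levels m t).head?.map Prod.fst,
             (pvGe levels m t).getLast?.map Prod.fst, res ++ [(a.1, b.1)]) := by
        have hcomb : pvBComb ((PySem.List.enumerate levels).foldl (pvBBuild m) (PySem.Dict.empty, PySem.Dict.empty))
              ((pvGe levels m (t + 1)).head?.map Prod.fst,
               (pvGe levels m (t + 1)).getLast?.map Prod.fst, res) t
            = ((pvGe levels m t).head?.map Prod.fst,
               (pvGe levels m t).getLast?.map Prod.fst) := by
          unfold pvBComb
          rcases hq : (pvEqf levels m t).head? with _ | f
          · have hqnil : pvEqf levels m t = [] := List.head?_eq_none_iff.mp hq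
            have hqnil' : (PySem.List.enumerate levels).filter (fun p => decide (pvKey m p = t)) = [] := hqnil
            have hg1 : ((PySem.List.enumerate levels).foldl (pvBBuild m) (PySem.Dict.empty, PySem.Dict.empty)).1.get? t = none := by
              rw [hB1, hqnil']; rfl
            have hg2 : ((PySem.List.enumerate levels).foldl (pvBBuild m) (PySem.Dict.empty, PySem.Dict.empty)).2.get? t = none := by
              rw [hB2, hqnil']; rfl
            have hmin : (pvGe levels m t).head?.map Prod.fst = (pvGe levels m (t + 1)).head?.map Prod.fst := by
              rw [hHd, hqnil]
              cases hx : ((pvGe levels m (t + 1)).head?.map Prod.fst) <;> simp [pvOptMin, hx]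
            have hmax : (pvGe levels m t).getLast?.map Prod.fst = (pvGe levels m (t + 1)).getLast?.map Prod.fst := by
              rw [hLd, hqnil]
              cases hx : ((pvGe levels m (t + 1)).getLast?.map Prod.fst) <;> simp [pvOptMax, hx]
            rw [hg1, hg2, hmin, hmax]
          · have hqne : pvEqf levels m t ≠ [] := by
              intro h0; rw [h0] at hq; simp at hq
            rcases hql : (pvEqf levels m t).getLast? with _ | g
            · exact absurd (List.getLast?_eq_none_iff.mp hql) hqne
            have hq' : ((PySem.List.enumerate levels).filter (fun p => decide (pvKey m p = t))).head? = some f := hq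
            have hql' : ((PySem.List.enumerate levels).filter (fun p => decide (pvKey m p = t))).getLast? = some g := hql
            have hg1 : ((PySem.List.enumerate levels).foldl (pvBBuild m) (PySem.Dict.empty, PySem.Dict.empty)).1.get? t = some f.1 := by
              rw [hB1, hq']; rfl
            have hg2 : ((PySem.List.enumerate levels).foldl (pvBBuild m) (PySem.Dict.empty, PySem.Dict.empty)).2.get? t = some g.1 := by
              rw [hB2, hql']; rfl
            have hmin : (pvGe levels m t).head?.map Prod.fst
                = some (match (pvGe levels m (t + 1)).head?.map Prod.fst with
                        | none => f.1 | some x => min x f.1) := by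
              rw [hHd, hq]
              cases hx : ((pvGe levels m (t + 1)).head?.map Prod.fst) <;> simp [pvOptMin, hx]
            have hmax : (pvGe levels m t).getLast?.map Prod.fst
                = some (match (pvGe levels m (t + 1)).getLast?.map Prod.fst with
                        | none => g.1 | some y => max y g.1) := by
              rw [hLd, hql]
              cases hx : ((pvGe levels m (t + 1)).getLast?.map Prod.fst) <;> simp [pvOptMax, hx]
            rw [hg1, hg2, hmin, hmax]
        unfold pvBSweep
        rw [hcomb, ha, hb]
        rfl
      rw [hAstep, hBstep]
      have hstep : t - 1 + 1 = t := by omega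
      have hstep2 : t + 1 - 1 = t := by omega
      rw [hstep2]
      have := ihk (t - 1) (by omega) (by omega) (res ++ [(a.1, b.1)])
      rw [hstep] at this
      exact this
  exact aux t.toNat t rfl ht res

-- ===== VERDICT (by name: the statement is the Claim_ definition above) =====
theorem alpha_intervals_from_levels_spec : Claim_equal_alpha_intervals_from_levels := by
  intro levels n m _ hpre
  unfold Pre_alpha_intervals_from_levels at hpre
  unfold Spec_alpha_intervals_from_levels alpha_intervals_from_levels alpha_intervals_from_levels_alt
  by_cases hm : m ≤ 1
  · rw [PySem.List.pyRange_neg_one_eq_nil (by omega : m ≤ 1),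
      PySem.List.pyRange_neg_one_eq_nil (by omega : m - 1 ≤ 0)]
    rfl
  · have hne : ∃ lv ∈ levels, m - 1 ≤ lv := hpre.resolve_left hm
    have hmain := pv_sweep_eq levels m hne (m - 1) (by omega) []
    rw [show m - 1 + 1 = m from by omega] at hmain
    have hnil : pvGe levels m m = [] := by
      unfold pvGe
      rw [List.filter_eq_nil_iff]
      intro p _
      simp only [decide_eq_true_eq]
      unfold pvKey
      omega
    rw [hnil] at hmain
    simp only [List.head?_nil, List.getLast?_nil, Option.map_none] at hmain
    exact hmain
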